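-- pv_equiv track=rewrite | github.com/maatkara/LeetCode | medium/sum-of-even-numbers-after-queries-985.py | sum_even_after_queries_bit
-- ===== SOURCE A (Python) =====
-- def sum_even_after_queries_bit(nums: list, queries: list) -> list:
--     ans = [0] * len(queries)
--     s = sum(num for num in nums if not num & 1)
--
--     for i, (v_add, j) in enumerate(queries):
--         old, nums[j] = nums[j], nums[j] + v_add
--         s += nums[j] * (~nums[j] & 1) - old * (~old & 1)
--         ans[i] = s
--
--     return ans
-- ===== SOURCE B (Python) =====
-- def sum_even_after_queries_bit(nums: list, queries: list) -> list:
--     ans = []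
--     for v_add, j in queries:
--         nums[j] += v_add
--         ans.append(sum(x for x in nums if x % 2 == 0))
--     return ans
-- ===== Notes on version B (the rewrite author's own statement) =====
-- stated objective: simpler
-- what changed: B drops A's incrementally-maintained even-sum accumulator (bit-trick parity deltas) and instead rescans nums after each in-place update, appending sum(x for x in nums if x % 2 == 0) to the answer.
import Mathlib
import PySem

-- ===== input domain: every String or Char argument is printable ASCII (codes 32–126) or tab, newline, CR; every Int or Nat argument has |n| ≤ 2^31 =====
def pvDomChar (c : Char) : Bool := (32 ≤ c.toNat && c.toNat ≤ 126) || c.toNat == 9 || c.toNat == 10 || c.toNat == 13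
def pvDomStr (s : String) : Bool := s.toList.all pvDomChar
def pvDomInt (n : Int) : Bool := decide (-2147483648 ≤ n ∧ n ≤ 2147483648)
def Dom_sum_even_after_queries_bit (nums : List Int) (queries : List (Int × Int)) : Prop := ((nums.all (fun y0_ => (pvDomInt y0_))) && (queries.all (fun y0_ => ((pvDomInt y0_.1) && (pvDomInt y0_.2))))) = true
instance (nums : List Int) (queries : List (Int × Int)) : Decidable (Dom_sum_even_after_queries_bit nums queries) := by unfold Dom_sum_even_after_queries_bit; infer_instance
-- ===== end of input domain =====

-- B replaces A's incrementally maintained even-sum (bit-trick parity deltas) with a full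
-- rescan of nums after each in-place update (simpler, not faster); both Pythons mutate the
-- nums argument identically, and the equivalence proved here is about the return value.

-- ===== PORT A =====
-- s = sum(num for num in nums if not num & 1)
def pvEvenA (nums : List Int) : Int :=
  nums.foldl (fun acc num => if PySem.Int.band num 1 = 0 then acc + num else acc) 0

-- one iteration of A's loop; state = (nums, s, ans), q = (i, (v_add, j))
def pvStepA (st : List Int × Int × List Int) (q : Int × (Int × Int)) : List Int × Int × List Int :=
  let old := PySem.List.pyGetD st.1 q.2.2 0
  let nums' := PySem.List.pySetD st.1 q.2.2 (old + q.2.1)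
  let nw := PySem.List.pyGetD nums' q.2.2 0
  let s' := st.2.1 + nw * (PySem.Int.band (Int.not nw) 1) - old * (PySem.Int.band (Int.not old) 1)
  (nums', s', PySem.List.pySetD st.2.2 q.1 s')

def sum_even_after_queries_bit (nums : List Int) (queries : List (Int × Int)) : List Int :=
  ((PySem.List.enumerate queries 0).foldl pvStepA
    (nums, pvEvenA nums, List.replicate queries.length (0 : Int))).2.2

-- ===== PORT B =====
-- sum(x for x in nums if x % 2 == 0)
def pvEvenB (nums : List Int) : Int :=
  nums.foldl (fun acc x => if PySem.Int.mod x 2 = 0 then acc + x else acc) 0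

-- one iteration of B's loop; state = (nums, ans), q = (v_add, j)
def pvStepB (st : List Int × List Int) (q : Int × Int) : List Int × List Int :=
  let nums' := PySem.List.pySetD st.1 q.2 (PySem.List.pyGetD st.1 q.2 0 + q.1)
  (nums', st.2 ++ [pvEvenB nums'])

def sum_even_after_queries_bit_alt (nums : List Int) (queries : List (Int × Int)) : List Int :=
  (queries.foldl pvStepB (nums, [])).2

-- ===== PRECONDITION & SPEC =====
-- Pre_ excludes exactly the inputs where both Pythons raise IndexError: a query index j
-- outside -len(nums) ≤ j < len(nums) (negative j wraps from the end in Python, so it is allowed).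
def Pre_sum_even_after_queries_bit (nums : List Int) (queries : List (Int × Int)) : Prop :=
  ∀ q ∈ queries, PySem.Raise.InRange nums.length q.2
instance (nums : List Int) (queries : List (Int × Int)) : Decidable (Pre_sum_even_after_queries_bit nums queries) := by unfold Pre_sum_even_after_queries_bit; infer_instance

def pvWitness_sum_even_after_queries_bit : List Int × (List (Int × Int)) := ([1, 2, 3, 4], [(1, 0), (-3, 1), (-4, 0), (2, -1)])

def Spec_sum_even_after_queries_bit (nums : List Int) (queries : List (Int × Int)) (out : List Int) : Prop := out = sum_even_after_queries_bit_alt nums queries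
instance (nums : List Int) (queries : List (Int × Int)) (out : List Int) : Decidable (Spec_sum_even_after_queries_bit nums queries out) := by unfold Spec_sum_even_after_queries_bit; infer_instance

-- ===== CLAIM (what is proved, stated in full; the proofs are below) =====
def Claim_equal_sum_even_after_queries_bit : Prop := ∀ (nums : List Int) (queries : List (Int × Int)), Dom_sum_even_after_queries_bit nums queries → Pre_sum_even_after_queries_bit nums queries → Spec_sum_even_after_queries_bit nums queries (sum_even_after_queries_bit nums queries)

-- ===== LEMMAS AND PROOFS =====

theorem pvNot_def (n : Int) : Int.not n = -n - 1 := by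
  cases n with
  | ofNat m => simp [Int.not]; omega
  | negSucc m => simp [Int.not]

-- A's start sum equals B's even-sum (not num & 1 ↔ num % 2 == 0)
theorem pvEvenA_eq_pvEvenB (nums : List Int) : pvEvenA nums = pvEvenB nums := by
  unfold pvEvenA pvEvenB
  congr 1
  funext acc num
  rw [PySem.Int.band_one]

-- ~n & 1 is the 0/1 parity indicator for even n
theorem pvNotBand (n : Int) : PySem.Int.band (Int.not n) 1 = if PySem.Int.mod n 2 = 0 then 1 else 0 := by
  rw [PySem.Int.band_one]
  rw [PySem.Int.mod_eq_emod_of_pos (by norm_num), PySem.Int.mod_eq_emod_of_pos (by norm_num)]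
  rw [pvNot_def]
  split <;> omega

theorem pvEvenB_aux (nums : List Int) : ∀ acc : Int,
    nums.foldl (fun acc x => if PySem.Int.mod x 2 = 0 then acc + x else acc) acc
      = acc + (nums.map (fun x => if PySem.Int.mod x 2 = 0 then x else 0)).sum := by
  induction nums with
  | nil => simp
  | cons y ys ih => intro acc; simp only [List.foldl_cons, List.map_cons, List.sum_cons, ih]; split <;> ring

-- even-sum as a mapped sum
theorem pvEvenB_eq_sum (nums : List Int) :
    pvEvenB nums = (nums.map (fun x => if PySem.Int.mod x 2 = 0 then x else 0)).sum := by
  unfold pvEvenB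
  rw [pvEvenB_aux]
  ring

theorem pvEvenB_set_aux (xs : List Int) : ∀ (k : Nat) (hk : k < xs.length) (w : Int),
    ((xs.set k w).map (fun x => if PySem.Int.mod x 2 = 0 then x else 0)).sum =
      (xs.map (fun x => if PySem.Int.mod x 2 = 0 then x else 0)).sum
        + (if PySem.Int.mod w 2 = 0 then w else 0) - (if PySem.Int.mod (xs[k]'hk) 2 = 0 then xs[k]'hk else 0) := by
  induction xs with
  | nil => intro k hk; simp at hk
  | cons y ys ih =>
    intro k hk w
    cases k with
    | zero => simp; ring
    | succ m =>
      simp only [List.set_cons_succ, List.map_cons, List.sum_cons, List.getElem_cons_succ]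
      rw [ih m (by simpa using hk) w]; ring

-- updating one cell shifts the even-sum by the two parity contributions
theorem pvEvenB_set (xs : List Int) (k : Nat) (hk : k < xs.length) (w : Int) :
    pvEvenB (xs.set k w) =
      pvEvenB xs + w * (if PySem.Int.mod w 2 = 0 then 1 else 0)
        - xs[k] * (if PySem.Int.mod xs[k] 2 = 0 then 1 else 0) := by
  rw [pvEvenB_eq_sum, pvEvenB_eq_sum, pvEvenB_set_aux xs k hk w]
  split <;> split <;> ring

-- the in-range index j resolves to a Nat index k
theorem pvIdx_resolve (n : Nat) (j : Int) (h : PySem.Raise.InRange n j) :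
    ∃ k : Nat, PySem.List.pyIdx? n j = some k ∧ k < n := by
  obtain ⟨h1, h2⟩ := h
  unfold PySem.List.pyIdx?
  by_cases h0 : 0 ≤ j
  · exact ⟨j.toNat, by simp [h0, h2], by omega⟩
  · refine ⟨n - (-j).toNat, by simp [h0, h1], by omega⟩

theorem pvGetD_resolve {xs : List Int} {j : Int} {k : Nat} (hk : PySem.List.pyIdx? xs.length j = some k) (hlt : k < xs.length) (d : Int) :
    PySem.List.pyGetD xs j d = xs[k]'hlt := by
  simp [PySem.List.pyGetD, PySem.List.pyGet?, hk, List.getElem?_eq_getElem hlt]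

theorem pvSetD_resolve {xs : List Int} {j : Int} {k : Nat} (hk : PySem.List.pyIdx? xs.length j = some k) (v : Int) :
    PySem.List.pySetD xs j v = xs.set k v := by
  simp [PySem.List.pySetD, PySem.List.pySet?, hk]

-- main loop invariant: A's fold (s = even-sum of current nums, ans = done ++ zeros, index = |done|)
-- tracks B's fold (current nums, done)
theorem pvLoop (qs : List (Int × Int)) : ∀ (nums done : List Int),
    (∀ q ∈ qs, PySem.Raise.InRange nums.length q.2) →
    ((PySem.List.enumerate qs (done.length : Int)).foldl pvStepA
        (nums, pvEvenB nums, done ++ List.replicate qs.length (0 : Int))).2.2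
      = (qs.foldl pvStepB (nums, done)).2 := by
  induction qs with
  | nil => intro nums done _; simp [PySem.List.enumerate]
  | cons q qs ih =>
    intro nums done hpre
    obtain ⟨k, hk, hlt⟩ := pvIdx_resolve nums.length q.2 (hpre q (by simp))
    rw [PySem.List.enumerate_cons, List.foldl_cons, List.foldl_cons]
    have hold : PySem.List.pyGetD nums q.2 0 = nums[k]'hlt := pvGetD_resolve hk hlt 0
    have hset : PySem.List.pySetD nums q.2 (PySem.List.pyGetD nums q.2 0 + q.1) = nums.set k (nums[k]'hlt + q.1) := by
      rw [hold]; exact pvSetD_resolve hk _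
    have hlen : (nums.set k (nums[k]'hlt + q.1)).length = nums.length := by simp
    have hk' : PySem.List.pyIdx? (nums.set k (nums[k]'hlt + q.1)).length q.2 = some k := by rw [hlen]; exact hk
    have hnw : PySem.List.pyGetD (nums.set k (nums[k]'hlt + q.1)) q.2 0 = nums[k]'hlt + q.1 := by
      rw [pvGetD_resolve hk' (by omega) 0]; simp
    have hs' : pvEvenB nums
        + (PySem.List.pyGetD (nums.set k (nums[k]'hlt + q.1)) q.2 0) * (PySem.Int.band (Int.not (PySem.List.pyGetD (nums.set k (nums[k]'hlt + q.1)) q.2 0)) 1)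
        - (PySem.List.pyGetD nums q.2 0) * (PySem.Int.band (Int.not (PySem.List.pyGetD nums q.2 0)) 1)
        = pvEvenB (nums.set k (nums[k]'hlt + q.1)) := by
      rw [hnw, hold, pvNotBand, pvNotBand, pvEvenB_set nums k hlt]
    show ((PySem.List.enumerate qs ((done.length : Int) + 1)).foldl pvStepA (pvStepA _ _)).2.2 = _
    rw [show pvStepA (nums, pvEvenB nums, done ++ List.replicate (q :: qs).length (0:Int)) ((done.length : Int), q)
        = (nums.set k (nums[k]'hlt + q.1), pvEvenB (nums.set k (nums[k]'hlt + q.1)),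
           done ++ pvEvenB (nums.set k (nums[k]'hlt + q.1)) :: List.replicate qs.length (0:Int)) from ?_]
    · have hstepB : pvStepB (nums, done) q = (nums.set k (nums[k]'hlt + q.1), done ++ [pvEvenB (nums.set k (nums[k]'hlt + q.1))]) := by
        simp only [pvStepB, hset]
      rw [hstepB]
      have := ih (nums.set k (nums[k]'hlt + q.1)) (done ++ [pvEvenB (nums.set k (nums[k]'hlt + q.1))])
        (by intro p hp; rw [hlen]; exact hpre p (by simp [hp]))
      simpa using this
    · simp only [pvStepA, hset, hs']
      have hans : PySem.List.pySetD (done ++ List.replicate (q :: qs).length (0:Int)) (done.length : Int) (pvEvenB (nums.set k (nums[k]'hlt + q.1)))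
          = done ++ pvEvenB (nums.set k (nums[k]'hlt + q.1)) :: List.replicate qs.length (0:Int) := by
        rw [PySem.List.pySetD_natCast, List.length_cons, List.replicate_succ,
            List.set_append_right _ _ (le_refl _)]
        simp
      rw [hans]

-- ===== VERDICT (by name: the statement is the Claim_ definition above) =====
theorem sum_even_after_queries_bit_spec : Claim_equal_sum_even_after_queries_bit := by
  intro nums queries _ hpre
  unfold Spec_sum_even_after_queries_bit sum_even_after_queries_bit sum_even_after_queries_bit_alt
  rw [pvEvenA_eq_pvEvenB]
  have := pvLoop queries nums [] hpre
  simpa using this
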